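-- pv_equiv track=rewrite | github.com/pharesim/propolis-wiki | wiki/wiki.py | formatPostLink
-- ===== SOURCE A (Python) =====
-- def formatPostLink(permlink):
--     permlink = permlink.replace('(','').replace(')','').replace(',','')
--     split = permlink.split("-")
--     if(len(split) > 1):
--         permlink = ''
--         for i, val in enumerate(split):
--             permlink += formatPostLinkSegment(val)
--             if(i+1 < len(split)):
--                 permlink += '-'
--     else:
--         permlink = formatPostLinkSegment(permlink)
--     return permlink
--
-- def formatPostLinkSegment(segment):
--     split = segment.split(':')
--     if(len(split) > 1):
--         segment = ''
--         for i, s in enumerate(split):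
--             segment += formatPostLinkSegment(s)
--             if(i+1 < len(split)):
--                 segment += ':'
--         return segment
--     keeplow = ['Disambiguation','disambiguation']
--     if(segment not in keeplow):
--         return segment.capitalize()
--     if(segment in keeplow):
--         return segment.lower()
--     return segment
-- ===== SOURCE B (Python) =====
-- def formatPostLink(permlink):
--     permlink = permlink.replace('(','').replace(')','').replace(',','')
--     out = []
--     tok = []
--     for c in permlink:
--         if c == '-' or c == ':':
--             out.append(_capToken(''.join(tok)))
--             out.append(c)
--             tok = []
--         else:
--             tok.append(c)
--     out.append(_capToken(''.join(tok)))
--     return ''.join(out)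
--
-- def _capToken(token):
--     if token in ('Disambiguation', 'disambiguation'):
--         return token.lower()
--     return token.capitalize()
-- ===== Notes on version B (the rewrite author's own statement) =====
-- stated objective: simpler
-- what changed: Replaces A's two-level split-on-hyphen / recursive split-on-colon joining with a single left-to-right character scan that emits each capitalized token and each delimiter verbatim in one pass.
import Mathlib
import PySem

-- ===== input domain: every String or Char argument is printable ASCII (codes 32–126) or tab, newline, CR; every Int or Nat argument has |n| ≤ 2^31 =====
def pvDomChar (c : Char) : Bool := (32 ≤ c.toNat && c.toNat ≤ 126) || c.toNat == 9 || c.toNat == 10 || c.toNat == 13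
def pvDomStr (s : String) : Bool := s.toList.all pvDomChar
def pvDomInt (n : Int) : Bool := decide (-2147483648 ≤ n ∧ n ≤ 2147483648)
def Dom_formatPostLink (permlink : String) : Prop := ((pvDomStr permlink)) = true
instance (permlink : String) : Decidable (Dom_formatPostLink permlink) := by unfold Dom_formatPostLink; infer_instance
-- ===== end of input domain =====

-- B replaces A's split-on-hyphen / recursive split-on-colon join with a single one-pass character scan (objective: simpler).

-- str.capitalize(): first char title-cased, rest lowered — hand-ported (not in PySem); exact on the ASCII domain, where title = upper.
def pvCapitalize (cs : List Char) : List Char :=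
  match cs with
  | [] => []
  | c :: rest => PySem.Chars.upperChar c :: rest.map PySem.Chars.lowerChar

-- ===== PORT A =====
-- the '+= seg; += sep unless last' loop of A (used at both levels, with the segment function passed in)
def pvJoinWith (f : List Char → List Char) (sep : Char) : List (List Char) → List Char
  | [] => []
  | [x] => f x
  | x :: y :: rest => f x ++ sep :: pvJoinWith f sep (y :: rest)

-- formatPostLinkSegment; fuel only makes the recursion structural (fuel = segment.length + 1 at each call site is always enough)
def pvSegA (fuel : Nat) (segment : List Char) : List Char :=
  match fuel with
  | 0 => segment
  | fuel + 1 =>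
    let split := PySem.Chars.splitOn segment [':']
    if split.length > 1 then pvJoinWith (pvSegA fuel) ':' split
    else if ¬ (segment = "Disambiguation".toList ∨ segment = "disambiguation".toList) then pvCapitalize segment
    else if segment = "Disambiguation".toList ∨ segment = "disambiguation".toList then PySem.Chars.lower segment
    else segment

def formatPostLink (permlink : String) : String :=
  let p := PySem.Chars.replace (PySem.Chars.replace (PySem.Chars.replace permlink.toList ['('] []) [')'] []) [','] []
  let split := PySem.Chars.splitOn p ['-']
  String.ofList
    (if split.length > 1 then pvJoinWith (fun v => pvSegA (v.length + 1) v) '-' split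
     else pvSegA (p.length + 1) p)

-- ===== PORT B =====
def pvCapTok (token : List Char) : List Char :=
  if token = "Disambiguation".toList ∨ token = "disambiguation".toList then PySem.Chars.lower token
  else pvCapitalize token

-- B's single pass: tok is the pending token, emitted (capitalized) at each delimiter and at the end
def pvScanB (tok : List Char) (cs : List Char) : List Char :=
  match cs with
  | [] => pvCapTok tok
  | c :: rest =>
    if c = '-' ∨ c = ':' then pvCapTok tok ++ c :: pvScanB [] rest
    else pvScanB (tok ++ [c]) rest

def formatPostLink_alt (permlink : String) : String :=
  let p := PySem.Chars.replace (PySem.Chars.replace (PySem.Chars.replace permlink.toList ['('] []) [')'] []) [','] []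
  String.ofList (pvScanB [] p)

-- ===== PRECONDITION & SPEC =====
def Spec_formatPostLink (permlink : String) (out : String) : Prop := out = formatPostLink_alt permlink
instance (permlink : String) (out : String) : Decidable (Spec_formatPostLink permlink out) := by unfold Spec_formatPostLink; infer_instance

-- ===== CLAIM (what is proved, stated in full; the proofs are below) =====
def Claim_equal_formatPostLink : Prop := ∀ (permlink : String), Dom_formatPostLink permlink → Spec_formatPostLink permlink (formatPostLink permlink)

-- ===== LEMMAS AND PROOFS =====

-- structural reference for split on a single-character separator
def pvSplit1 (d : Char) : List Char → List (List Char)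
  | [] => [[]]
  | c :: cs => if c = d then [] :: pvSplit1 d cs else (pvSplit1 d cs).modifyHead (c :: ·)

theorem pvSplit1_ne_nil (d : Char) (l : List Char) : pvSplit1 d l ≠ [] := by
  induction l with
  | nil => simp [pvSplit1]
  | cons c cs ih =>
    simp only [pvSplit1]
    split_ifs
    · simp
    · cases h : pvSplit1 d cs with
      | nil => exact absurd h ih
      | cons q qs => simp [List.modifyHead]

theorem pvSplitOn_go_eq (d : Char) (fuel : Nat) (l cur : List Char) (acc : List (List Char))
    (h : l.length ≤ fuel) :
    PySem.Chars.splitOn.go [d] fuel l cur acc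
      = acc.reverse ++ (pvSplit1 d l).modifyHead (cur.reverse ++ ·) := by
  induction fuel generalizing l cur acc with
  | zero =>
    have : l = [] := List.eq_nil_of_length_eq_zero (Nat.le_zero.mp h)
    subst this
    simp [PySem.Chars.splitOn.go, pvSplit1]
  | succ fuel ih =>
    cases l with
    | nil => simp [PySem.Chars.splitOn.go, pvSplit1]
    | cons c rest =>
      by_cases hc : c = d
      · subst hc
        have hpre : [c].isPrefixOf (c :: rest) = true := by simp [List.isPrefixOf]
        rw [PySem.Chars.splitOn.go, if_pos hpre]
        simp only [List.length, List.drop]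
        rw [ih rest [] (cur.reverse :: acc) (by simpa using Nat.le_of_succ_le_succ h)]
        cases hr : pvSplit1 c rest with
        | nil => exact absurd hr (pvSplit1_ne_nil c rest)
        | cons q qs => simp [pvSplit1, hr, List.modifyHead]
      · have hpre : [d].isPrefixOf (c :: rest) = false := by
          simp [List.isPrefixOf]
          intro h'; exact absurd h'.symm hc
        rw [PySem.Chars.splitOn.go, if_neg (by simp [hpre])]
        rw [ih rest (c :: cur) acc (by simpa using Nat.le_of_succ_le_succ h)]
        have hne := pvSplit1_ne_nil d rest
        cases hr : pvSplit1 d rest with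
        | nil => exact absurd hr hne
        | cons p ps => simp [pvSplit1, hr, if_neg hc, List.modifyHead]

theorem pvSplitOn_single (d : Char) (l : List Char) :
    PySem.Chars.splitOn l [d] = pvSplit1 d l := by
  rw [PySem.Chars.splitOn, pvSplitOn_go_eq d (l.length + 1) l [] [] (Nat.le_succ _)]
  cases h : pvSplit1 d l with
  | nil => exact absurd h (pvSplit1_ne_nil d l)
  | cons p ps => simp [List.modifyHead]

theorem pvSplit1_not_mem (d : Char) (l : List Char) : ∀ p ∈ pvSplit1 d l, d ∉ p := by
  induction l with
  | nil => simp [pvSplit1]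
  | cons c cs ih =>
    intro p hp
    simp only [pvSplit1] at hp
    split_ifs at hp with hc
    · rcases List.mem_cons.mp hp with hp | hp
      · simp [hp]
      · exact ih p hp
    · cases hr : pvSplit1 d cs with
      | nil => exact absurd hr (pvSplit1_ne_nil d cs)
      | cons q qs =>
        rw [hr, List.modifyHead] at hp
        rcases List.mem_cons.mp hp with hp | hp
        · subst hp
          intro hmem
          rcases List.mem_cons.mp hmem with hmem | hmem
          · exact hc hmem.symm
          · exact ih q (by simp [hr]) hmem
        · exact ih p (by simp [hr, hp])

theorem pvSplit1_of_not_mem (d : Char) (l : List Char) (h : d ∉ l) : pvSplit1 d l = [l] := by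
  induction l with
  | nil => simp [pvSplit1]
  | cons c cs ih =>
    simp only [pvSplit1]
    rw [if_neg (fun hc => h (by simp [hc]))]
    rw [ih (fun hm => h (by simp [hm]))]
    simp [List.modifyHead]

theorem pvSplit1_len_one (d : Char) (l : List Char) (h : (pvSplit1 d l).length ≤ 1) : d ∉ l := by
  induction l with
  | nil => simp
  | cons c cs ih =>
    simp only [pvSplit1] at h
    split_ifs at h with hc
    · have h0 : (pvSplit1 d cs).length = 0 := by
        simp only [List.length_cons] at h; omega
      exact absurd (List.eq_nil_of_length_eq_zero h0) (pvSplit1_ne_nil d cs)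
    · cases hr : pvSplit1 d cs with
      | nil => exact absurd hr (pvSplit1_ne_nil d cs)
      | cons q qs =>
        rw [hr, List.modifyHead] at h
        intro hm
        rcases List.mem_cons.mp hm with hm | hm
        · exact hc hm.symm
        · refine ih ?_ hm
          rw [hr]
          simp only [List.length_cons] at h ⊢
          omega

theorem pvSplit1_mem_of_two (d : Char) (l : List Char) (h : 1 < (pvSplit1 d l).length) : d ∈ l := by
  by_contra hm
  rw [pvSplit1_of_not_mem d l hm] at h
  simp at h

theorem pvSplit1_append (d : Char) (pre l : List Char) (h : d ∉ pre) :
    pvSplit1 d (pre ++ l) = (pvSplit1 d l).modifyHead (pre ++ ·) := by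
  induction pre with
  | nil =>
    cases hr : pvSplit1 d l with
    | nil => exact absurd hr (pvSplit1_ne_nil d l)
    | cons q qs => simp [hr, List.modifyHead]
  | cons c cs ih =>
    have hc : c ≠ d := fun hc => h (by simp [hc])
    simp only [List.cons_append, pvSplit1, if_neg hc]
    rw [ih (fun hm => h (by simp [hm]))]
    cases hr : pvSplit1 d l with
    | nil => exact absurd hr (pvSplit1_ne_nil d l)
    | cons q qs => simp [hr, List.modifyHead]

-- the reference value: A's nested split/join, written over pvSplit1
def pvSegf (seg : List Char) : List Char := pvJoinWith pvCapTok ':' (pvSplit1 ':' seg)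
def pvRender (cs : List Char) : List Char := pvJoinWith pvSegf '-' (pvSplit1 '-' cs)

theorem pvJoinWith_congr (f g : List Char → List Char) (sep : Char) (l : List (List Char))
    (h : ∀ x ∈ l, f x = g x) : pvJoinWith f sep l = pvJoinWith g sep l := by
  induction l with
  | nil => rfl
  | cons x xs ih =>
    cases xs with
    | nil => simp [pvJoinWith, h x (by simp)]
    | cons y ys =>
      simp only [pvJoinWith]
      rw [h x (by simp), ih (fun z hz => h z (by simp [hz]))]

-- A's leaf (the double if) is pvCapTok
theorem pvSegA_leaf (seg : List Char) (fuel : Nat) (h : ':' ∉ seg) :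
    pvSegA (fuel + 1) seg = pvCapTok seg := by
  simp only [pvSegA, pvSplitOn_single, pvSplit1_of_not_mem ':' seg h]
  simp only [List.length_singleton, gt_iff_lt, lt_irrefl, if_false, reduceIte, pvCapTok]
  split_ifs with h1 h2 <;> simp_all

theorem pvSegA_eval (seg : List Char) : pvSegA (seg.length + 1) seg = pvSegf seg := by
  by_cases hlen : (pvSplit1 ':' seg).length ≤ 1
  · have hm : ':' ∉ seg := pvSplit1_len_one ':' seg hlen
    rw [pvSegA_leaf seg seg.length hm, pvSegf, pvSplit1_of_not_mem ':' seg hm, pvJoinWith]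
  · push_neg at hlen
    have hmem : ':' ∈ seg := pvSplit1_mem_of_two ':' seg hlen
    obtain ⟨n, hn⟩ : ∃ n, seg.length = n + 1 := by
      cases seg with
      | nil => simp at hmem
      | cons c cs => exact ⟨cs.length, rfl⟩
    simp only [pvSegA, pvSplitOn_single, if_pos hlen]
    rw [pvSegf]
    apply pvJoinWith_congr
    intro p hp
    have hnp : ':' ∉ p := pvSplit1_not_mem ':' seg p hp
    rw [hn]
    exact pvSegA_leaf p n hnp

-- A's top level is pvRender
theorem pvA_eq_render (p : List Char) :
    (if (PySem.Chars.splitOn p ['-']).length > 1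
     then pvJoinWith (fun v => pvSegA (v.length + 1) v) '-' (PySem.Chars.splitOn p ['-'])
     else pvSegA (p.length + 1) p) = pvRender p := by
  simp only [pvSplitOn_single]
  split_ifs with h
  · rw [pvRender]
    exact pvJoinWith_congr _ _ _ _ (fun v _ => pvSegA_eval v)
  · push_neg at h
    have hm : '-' ∉ p := pvSplit1_len_one '-' p h
    rw [pvSegA_eval, pvRender, pvSplit1_of_not_mem '-' p hm, pvJoinWith]

-- render of a string with a no-delimiter prefix peels the prefix into the first token
theorem pvRender_pre_dash (pre cs : List Char) (hd : '-' ∉ pre) (hc : ':' ∉ pre) :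
    pvRender (pre ++ '-' :: cs) = pvCapTok pre ++ '-' :: pvRender cs := by
  rw [pvRender, pvSplit1_append '-' pre ('-' :: cs) hd]
  have h1 : pvSplit1 '-' ('-' :: cs) = [] :: pvSplit1 '-' cs := by simp [pvSplit1]
  cases hr : pvSplit1 '-' cs with
  | nil => exact absurd hr (pvSplit1_ne_nil '-' cs)
  | cons q qs =>
    simp only [h1, hr, List.modifyHead, List.append_nil, pvJoinWith, pvRender]
    congr 1
    rw [pvSegf, pvSplit1_of_not_mem ':' pre hc, pvJoinWith]

theorem pvSegf_pre_colon (pre h : List Char) (hc : ':' ∉ pre) :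
    pvSegf (pre ++ ':' :: h) = pvCapTok pre ++ ':' :: pvSegf h := by
  rw [pvSegf, pvSplit1_append ':' pre (':' :: h) hc]
  have h1 : pvSplit1 ':' (':' :: h) = [] :: pvSplit1 ':' h := by simp [pvSplit1]
  cases hr : pvSplit1 ':' h with
  | nil => exact absurd hr (pvSplit1_ne_nil ':' h)
  | cons q qs =>
    simp only [h1, hr, List.modifyHead, List.append_nil, pvJoinWith, pvSegf]

theorem pvRender_pre_colon (pre cs : List Char) (hd : '-' ∉ pre) (hc : ':' ∉ pre) :
    pvRender (pre ++ ':' :: cs) = pvCapTok pre ++ ':' :: pvRender cs := by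
  rw [pvRender, pvSplit1_append '-' pre (':' :: cs) hd]
  have h1 : pvSplit1 '-' (':' :: cs) = (pvSplit1 '-' cs).modifyHead (':' :: ·) := by
    simp [pvSplit1]
  cases hr : pvSplit1 '-' cs with
  | nil => exact absurd hr (pvSplit1_ne_nil '-' cs)
  | cons q qs =>
    have hq : pvSegf (pre ++ ':' :: q) = pvCapTok pre ++ ':' :: pvSegf q :=
      pvSegf_pre_colon pre q hc
    cases qs with
    | nil => simp [h1, hr, List.modifyHead, pvJoinWith, pvRender, hq]
    | cons r rs => simp [h1, hr, List.modifyHead, pvJoinWith, pvRender, hq]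

theorem pvRender_no_delim (pre : List Char) (hd : '-' ∉ pre) (hc : ':' ∉ pre) :
    pvRender pre = pvCapTok pre := by
  rw [pvRender, pvSplit1_of_not_mem '-' pre hd, pvJoinWith, pvSegf,
      pvSplit1_of_not_mem ':' pre hc, pvJoinWith]

-- B's scan computes pvRender
theorem pvScanB_eq_render (cs : List Char) : ∀ pre, '-' ∉ pre → ':' ∉ pre →
    pvScanB pre cs = pvRender (pre ++ cs) := by
  induction cs with
  | nil =>
    intro pre hd hc
    rw [List.append_nil, pvScanB, pvRender_no_delim pre hd hc]
  | cons c rest ih =>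
    intro pre hd hc
    by_cases hdelim : c = '-' ∨ c = ':'
    · rw [pvScanB, if_pos hdelim]
      rcases hdelim with h1 | h1 <;> subst h1
      · rw [ih [] (by simp) (by simp), List.nil_append, pvRender_pre_dash pre rest hd hc]
      · rw [ih [] (by simp) (by simp), List.nil_append, pvRender_pre_colon pre rest hd hc]
    · rw [pvScanB, if_neg hdelim]
      push_neg at hdelim
      rw [ih (pre ++ [c]) (by simp [hd, Ne.symm, hdelim.1]) (by simp [hc, Ne.symm, hdelim.2])]
      simp

-- A's split/join and B's scan compute the same list
theorem pvMain (p : List Char) :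
    (if (PySem.Chars.splitOn p ['-']).length > 1
     then pvJoinWith (fun v => pvSegA (v.length + 1) v) '-' (PySem.Chars.splitOn p ['-'])
     else pvSegA (p.length + 1) p) = pvScanB [] p := by
  rw [pvScanB_eq_render p [] (by simp) (by simp), List.nil_append]
  exact pvA_eq_render p

-- ===== VERDICT (by name: the statement is the Claim_ definition above) =====
theorem formatPostLink_spec : Claim_equal_formatPostLink := by
  intro permlink _
  show formatPostLink permlink = formatPostLink_alt permlink
  unfold formatPostLink formatPostLink_alt
  exact congrArg String.ofList (pvMain _)
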